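-- pv_equiv track=rewrite | github.com/locobuzz-chandru/Python | PracticePrograms/prob.py | is_ord_sub
-- ===== SOURCE A (Python) =====
-- def is_ord_sub(smlst, biglst):
--     d = {}
--     for num in smlst:
--         i = 0
--         while i < len(biglst):
--             if biglst[i] == num:
--                 d[num] = d.get(num, []) + [i]
--             i += 1
--     lst = [max(val) for val in d.values()]
--     for i in range(len(lst) - 1):
--         if not lst[i + 1] > lst[i]:
--             return False
--     return True
-- ===== SOURCE B (Python) =====
-- def is_ord_sub(smlst, biglst):
--     # One pass over biglst to record the last index of each value, then a
--     # single pass over smlst checking that the last-index sequence (first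
--     # occurrences of values present in biglst) strictly increases.
--     last = {}
--     for i, v in enumerate(biglst):
--         last[v] = i
--     prev = None
--     seen = set()
--     for num in smlst:
--         if num in last and num not in seen:
--             j = last[num]
--             if prev is not None and not j > prev:
--                 return False
--             prev = j
--             seen.add(num)
--     return True
-- ===== Notes on version B (the rewrite author's own statement) =====
-- stated objective: faster
-- what changed: Instead of scanning all of biglst once per element of smlst and building index lists, B records the last index of every value in one pass over biglst and then checks strict increase in one pass over smlst with a seen-set.
import Mathlib
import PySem

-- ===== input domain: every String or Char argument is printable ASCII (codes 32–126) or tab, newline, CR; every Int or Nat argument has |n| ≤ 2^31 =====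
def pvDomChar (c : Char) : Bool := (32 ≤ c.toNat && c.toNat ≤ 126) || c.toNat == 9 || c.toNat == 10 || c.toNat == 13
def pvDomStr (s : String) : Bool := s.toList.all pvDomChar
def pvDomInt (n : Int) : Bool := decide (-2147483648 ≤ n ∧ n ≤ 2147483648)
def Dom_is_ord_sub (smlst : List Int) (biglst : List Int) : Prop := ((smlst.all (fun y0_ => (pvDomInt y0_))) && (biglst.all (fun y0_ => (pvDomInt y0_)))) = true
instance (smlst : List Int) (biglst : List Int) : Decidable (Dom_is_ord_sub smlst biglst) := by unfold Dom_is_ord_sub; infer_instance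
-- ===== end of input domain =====

-- B replaces A's per-element scans of biglst (index-list dict, quadratic) by one pass over
-- biglst recording each value's last index plus one pass over smlst; same return value.


-- ===== PORT A =====
-- inner while loop: 'i = 0; while i < len(biglst): if biglst[i] == num: d[num] = d.get(num, []) + [i]; i += 1'
def pvInner (biglst : List Int) (num : Int) (d : PySem.Dict Int (List Int)) : PySem.Dict Int (List Int) :=
  (PySem.List.pyRange 0 (PySem.List.len biglst) 1).foldl
    (fun d i => if PySem.List.pyGetD biglst i 0 = num then d.insert num (d.getD num [] ++ [i]) else d) d

-- max(val): val is nonempty wherever A evaluates it, so the '.getD 0' default is never used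
def pvMax (val : List Int) : Int := (PySem.List.max? val (fun x => x)).getD 0

-- 'for i in range(len(lst) - 1): if not lst[i + 1] > lst[i]: return False' then 'return True'
def pvChkLoop (lst : List Int) : List Int → Bool
  | [] => true
  | i :: rest =>
    if ¬ (PySem.List.pyGetD lst (i + 1) 0 > PySem.List.pyGetD lst i 0) then false
    else pvChkLoop lst rest

def is_ord_sub (smlst : List Int) (biglst : List Int) : Bool :=
  let d := smlst.foldl (fun d num => pvInner biglst num d) PySem.Dict.empty
  let lst := (PySem.Dict.values d).map (fun val => pvMax val)
  pvChkLoop lst (PySem.List.pyRange 0 (PySem.List.len lst - 1) 1)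

-- ===== PORT B =====
-- 'for num in smlst: if num in last and num not in seen: …' with early return False
def pvGo (last : PySem.Dict Int Int) : List Int → Option Int → PySem.Set Int → Bool
  | [], _, _ => true
  | num :: rest, prev, seen =>
    if PySem.Dict.contains last num && !(PySem.Set.contains seen num) then
      let j := PySem.Dict.getD last num 0   -- last[num]; the key is present under the guard
      match prev with
      | some p => if ¬ (j > p) then false else pvGo last rest (some j) (PySem.Set.add seen num)
      | none => pvGo last rest (some j) (PySem.Set.add seen num)
    else pvGo last rest prev seen

def is_ord_sub_alt (smlst : List Int) (biglst : List Int) : Bool :=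
  let last := (PySem.List.enumerate biglst 0).foldl (fun d p => d.insert p.2 p.1) PySem.Dict.empty
  pvGo last smlst none PySem.Set.empty

-- ===== PRECONDITION & SPEC =====
def Spec_is_ord_sub (smlst : List Int) (biglst : List Int) (out : Bool) : Prop := out = is_ord_sub_alt smlst biglst
instance (smlst : List Int) (biglst : List Int) (out : Bool) : Decidable (Spec_is_ord_sub smlst biglst out) := by unfold Spec_is_ord_sub; infer_instance

-- ===== CLAIM (what is proved, stated in full; the proofs are below) =====
def Claim_equal_is_ord_sub : Prop := ∀ (smlst : List Int) (biglst : List Int), Dom_is_ord_sub smlst biglst → Spec_is_ord_sub smlst biglst (is_ord_sub smlst biglst)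

-- ===== LEMMAS AND PROOFS =====

def pvIdxs (biglst : List Int) (v : Int) : List Int :=
  ((PySem.List.enumerate biglst 0).filter (fun p => decide (p.2 = v))).map (·.1)
def pvLi (biglst : List Int) (v : Int) : Int := pvMax (pvIdxs biglst v)
def pvKeyseq (biglst : List Int) : List Int → List Int → List Int
  | [], _ => []
  | n :: rest, seen =>
    if n ∈ biglst ∧ n ∉ seen then n :: pvKeyseq biglst rest (seen ++ [n])
    else pvKeyseq biglst rest seen
def pvChk : List Int → Bool
  | a :: b :: t => if b ≤ a then false else pvChk (b :: t)
  | _ => true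
def pvChkFrom : Option Int → List Int → Bool
  | none, l => pvChk l
  | some p, l => pvChk (p :: l)

-- L1: max characterization
lemma pvMax_spec (l : List Int) (m : Int) (h1 : m ∈ l) (h2 : ∀ x ∈ l, x ≤ m) : pvMax l = m := by
  have hne : l ≠ [] := by rintro rfl; simp at h1
  obtain ⟨w, hw⟩ : ∃ w, PySem.List.max? l (fun x => x) = some w := by
    cases hh : PySem.List.max? l (fun x => x) with
    | none => exact absurd ((PySem.List.max?_eq_none_iff _ _).mp hh) hne
    | some w => exact ⟨w, rfl⟩
  have hwm := PySem.List.max?_mem hw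
  have hle := PySem.List.max?_isMax hw
  simp [pvMax, hw]
  exact le_antisymm (h2 w hwm) (hle m h1)

-- L2: membership in biglst vs idxs nonempty
lemma pvIdxs_ne_nil_iff (biglst : List Int) (v : Int) : pvIdxs biglst v ≠ [] ↔ v ∈ biglst := by
  rw [show v ∈ biglst ↔ v ∈ (PySem.List.enumerate biglst 0).map (fun p => p.2) by
    rw [PySem.List.map_snd_enumerate]]
  simp only [pvIdxs, ne_eq, List.map_eq_nil_iff, List.filter_eq_nil_iff, List.mem_map, not_forall]
  constructor
  · rintro ⟨p, hm, hp⟩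
    exact ⟨p, hm, by simpa using hp⟩
  · rintro ⟨p, hm, rfl⟩
    exact ⟨p, hm, by simp⟩

-- L3: idxs strictly increasing
lemma pvIdxs_pairwise (biglst : List Int) (v : Int) : (pvIdxs biglst v).Pairwise (· < ·) := by
  have := PySem.List.pairwise_lt_enumerate biglst 0
  exact List.pairwise_map.mpr (List.Pairwise.filter _ this)

-- L4: li properties
lemma pvLi_mem (biglst : List Int) (v : Int) (h : v ∈ biglst) : pvLi biglst v ∈ pvIdxs biglst v := by
  have hne := (pvIdxs_ne_nil_iff biglst v).mpr h
  obtain ⟨w, hw⟩ : ∃ w, PySem.List.max? (pvIdxs biglst v) (fun x => x) = some w := by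
    cases hh : PySem.List.max? (pvIdxs biglst v) (fun x => x) with
    | none => exact absurd ((PySem.List.max?_eq_none_iff _ _).mp hh) hne
    | some w => exact ⟨w, rfl⟩
  have := PySem.List.max?_mem hw
  simpa [pvLi, pvMax, hw] using this

lemma pvLi_isMax (biglst : List Int) (v : Int) (h : v ∈ biglst) :
    ∀ x ∈ pvIdxs biglst v, x ≤ pvLi biglst v := by
  have hne := (pvIdxs_ne_nil_iff biglst v).mpr h
  obtain ⟨w, hw⟩ : ∃ w, PySem.List.max? (pvIdxs biglst v) (fun x => x) = some w := by
    cases hh : PySem.List.max? (pvIdxs biglst v) (fun x => x) with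
    | none => exact absurd ((PySem.List.max?_eq_none_iff _ _).mp hh) hne
    | some w => exact ⟨w, rfl⟩
  intro x hx
  have := PySem.List.max?_isMax hw x hx
  simpa [pvLi, pvMax, hw] using this
-- L5: getLast? of cons as Option.or
lemma getLast?_cons_or (a : Int) (m : List Int) : (a :: m).getLast? = m.getLast?.or (some a) := by
  cases m with
  | nil => rfl
  | cons b t => rw [List.getLast?_cons_cons]; cases hh : (b :: t).getLast? with
    | none => simp [List.getLast?_eq_none_iff] at hh
    | some w => rfl

-- L6: the last-index dict lookup
lemma get?_fold_last (l : List (Int × Int)) (v : Int) :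
    ∀ d : PySem.Dict Int Int,
    (l.foldl (fun d p => d.insert p.2 p.1) d).get? v =
      (((l.filter (fun p => decide (p.2 = v))).map (·.1)).getLast?).or (d.get? v) := by
  induction l with
  | nil => intro d; simp
  | cons p rest ih =>
    obtain ⟨i, w⟩ := p
    intro d
    simp only [List.foldl_cons, ih, List.filter_cons]
    by_cases h : w = v
    · subst h
      simp only [decide_true, if_true, List.map_cons, getLast?_cons_or, Option.or_assoc,
        PySem.Dict.get?_insert_self]
      cases (List.map (fun x => x.1) (rest.filter (fun p => decide (p.2 = w)))).getLast? <;> rfl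
    · have hd : (decide ((i, w).2 = v)) = false := by simp [h]
      rw [hd]
      simp only [Bool.false_eq_true, if_false]
      rw [PySem.Dict.get?_insert_of_ne _ _ (fun hvw => h hvw.symm)]

-- L7: last element of strictly increasing list = max
lemma pairwise_le_getLast : ∀ (l : List Int) (m : Int), l.Pairwise (· < ·) →
    (l.getLast? = some m) → m ∈ l ∧ ∀ x ∈ l, x ≤ m := by
  intro l
  induction l with
  | nil => intro m _ h; simp at h
  | cons a t ih =>
    intro m hp hl
    cases t with
    | nil =>
      simp only [List.getLast?_singleton, Option.some.injEq] at hl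
      subst hl; simp
    | cons b t2 =>
      rw [List.getLast?_cons_cons] at hl
      have hp' := (List.pairwise_cons.mp hp).2
      obtain ⟨hm, hall⟩ := ih m hp' hl
      refine ⟨List.mem_cons_of_mem _ hm, ?_⟩
      intro x hx
      rcases List.mem_cons.mp hx with rfl | hx2
      · exact le_of_lt (lt_of_lt_of_le ((List.pairwise_cons.mp hp).1 m hm) (le_refl m))
      · exact hall x hx2

-- L8: B's dict characterized
lemma lastDict_get? (biglst : List Int) (v : Int) :
    ((PySem.List.enumerate biglst 0).foldl (fun d p => d.insert p.2 p.1) PySem.Dict.empty).get? v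
      = if v ∈ biglst then some (pvLi biglst v) else none := by
  rw [get?_fold_last, PySem.Dict.get?_empty]
  by_cases h : v ∈ biglst
  · have hne := (pvIdxs_ne_nil_iff biglst v).mpr h
    obtain ⟨m, hm⟩ : ∃ m, (pvIdxs biglst v).getLast? = some m := by
      cases hh : (pvIdxs biglst v).getLast? with
      | none => exact absurd (List.getLast?_eq_none_iff.mp hh) hne
      | some m => exact ⟨m, rfl⟩
    obtain ⟨hmem, hall⟩ := pairwise_le_getLast _ m (pvIdxs_pairwise biglst v) hm
    have : pvLi biglst v = m := pvMax_spec _ m hmem hall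
    simp only [pvIdxs] at hm
    simp [hm, h, this]
  · have : pvIdxs biglst v = [] := by
      by_contra hne; exact h ((pvIdxs_ne_nil_iff biglst v).mp hne)
    simp only [pvIdxs] at this
    simp [this, h]
-- L9: the A-side collecting fold over (index, value) pairs
lemma foldl_collect (num : Int) : ∀ (l : List (Int × Int)) (d : PySem.Dict Int (List Int)),
    l.foldl (fun d p => if p.2 = num then d.insert num (d.getD num [] ++ [p.1]) else d) d
    = if num ∈ l.map (·.2)
      then d.insert num (d.getD num [] ++ (l.filter (fun p => decide (p.2 = num))).map (·.1))
      else d := by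
  intro l
  induction l with
  | nil => intro d; simp
  | cons p rest ih =>
    obtain ⟨i, w⟩ := p
    intro d
    by_cases h : w = num
    · subst h
      simp only [List.foldl_cons, ih, List.map_cons, List.mem_cons, true_or,
        List.filter_cons, decide_true, if_pos]
      by_cases h2 : w ∈ rest.map (·.2)
      · rw [if_pos h2, PySem.Dict.getD_insert_self, PySem.Dict.insert_insert_self,
          List.append_assoc]
        rfl
      · rw [if_neg h2]
        have hfil : rest.filter (fun p => decide (p.2 = w)) = [] := by
          rw [List.filter_eq_nil_iff]
          intro p hp
          simp only [decide_eq_true_eq]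
          intro hq
          exact h2 (List.mem_map.mpr ⟨p, hp, hq⟩)
        rw [hfil]
        simp
    · simp only [List.foldl_cons, if_neg h, ih, List.map_cons, List.mem_cons, List.filter_cons]
      have hd : (decide ((i, w).2 = num)) = false := by simp [h]
      rw [hd]
      simp only [Bool.false_eq_true, if_false]
      have hne : ¬ num = w := fun hh => h hh.symm
      by_cases h2 : num ∈ rest.map (·.2) <;> simp [hne, h2]

-- L10: pvInner characterized
lemma pvInner_eq (biglst : List Int) (num : Int) (d : PySem.Dict Int (List Int)) :
    pvInner biglst num d =
      if num ∈ biglst then d.insert num (d.getD num [] ++ pvIdxs biglst num) else d := by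
  have hmap : PySem.List.enumerate biglst 0 =
      (PySem.List.pyRange 0 (PySem.List.len biglst) 1).map
        (fun j => (j, PySem.List.pyGetD biglst j 0)) := PySem.List.enumerate_eq_map_pyRange biglst 0
  have : pvInner biglst num d =
      (PySem.List.enumerate biglst 0).foldl
        (fun d p => if p.2 = num then d.insert num (d.getD num [] ++ [p.1]) else d) d := by
    rw [hmap, List.foldl_map]
    rfl
  rw [this, foldl_collect, PySem.List.map_snd_enumerate]
  rfl
-- invariant on A's dict
def pvGood (biglst : List Int) (d : PySem.Dict Int (List Int)) : Prop :=
  d.keys.Nodup ∧ ∀ k ∈ d.keys, k ∈ biglst ∧ pvLi biglst k ∈ d.getD k [] ∧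
    ∀ x ∈ d.getD k [], x ≤ pvLi biglst k

-- L11: one step preserves the invariant and appends the key exactly when new & present
lemma pvInner_good (biglst : List Int) (num : Int) (d : PySem.Dict Int (List Int))
    (hg : pvGood biglst d) :
    pvGood biglst (pvInner biglst num d) ∧
    (pvInner biglst num d).keys =
      (if num ∈ biglst ∧ num ∉ d.keys then d.keys ++ [num] else d.keys) := by
  obtain ⟨hnd, hk⟩ := hg
  rw [pvInner_eq]
  by_cases hb : num ∈ biglst
  · rw [if_pos hb]
    by_cases hc : num ∈ d.keys
    · have hcc : d.contains num = true := (PySem.Dict.contains_iff_mem_keys d num).mpr hc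
      have hkeys := PySem.Dict.keys_insert_of_contains d (d.getD num [] ++ pvIdxs biglst num) hcc
      constructor
      · constructor
        · rw [hkeys]; exact hnd
        · intro k hkmem
          rw [hkeys] at hkmem
          by_cases hkn : k = num
          · subst hkn
            rw [PySem.Dict.getD_insert_self]
            refine ⟨hb, ?_, ?_⟩
            · exact List.mem_append.mpr (Or.inr (pvLi_mem biglst k hb))
            · intro x hx
              rcases List.mem_append.mp hx with hx1 | hx2
              · exact (hk k hc).2.2 x hx1
              · exact pvLi_isMax biglst k hb x hx2
          · rw [PySem.Dict.getD_insert_of_ne _ _ _ hkn]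
            exact hk k hkmem
      · rw [hkeys, if_neg (fun hh => hh.2 hc)]
    · have hcc : d.contains num = false := by
        cases hx : d.contains num
        · rfl
        · exact absurd ((PySem.Dict.contains_iff_mem_keys d num).mp hx) hc
      have hkeys := PySem.Dict.keys_insert_of_not_contains d (d.getD num [] ++ pvIdxs biglst num) hcc
      have hgd : d.getD num [] = [] := by
        rw [PySem.Dict.getD_eq_get?_getD, (PySem.Dict.get?_eq_none_iff_not_mem_keys d num).mpr hc]
        rfl
      constructor
      · constructor
        · rw [hkeys]
          refine List.nodup_append.mpr ⟨hnd, List.nodup_singleton num, ?_⟩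
          intro a ha b hb2
          simp only [List.mem_singleton] at hb2
          subst hb2
          exact fun hh => hc (hh ▸ ha)
        · intro k hkmem
          rw [hkeys] at hkmem
          by_cases hkn : k = num
          · subst hkn
            rw [PySem.Dict.getD_insert_self, hgd]
            refine ⟨hb, List.mem_append.mpr (Or.inr (pvLi_mem biglst k hb)), ?_⟩
            intro x hx
            simp only [List.nil_append] at hx ⊢
            exact pvLi_isMax biglst k hb x hx
          · rw [PySem.Dict.getD_insert_of_ne _ _ _ hkn]
            rcases List.mem_append.mp hkmem with h1 | h2
            · exact hk k h1
            · simp at h2; exact absurd h2 hkn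
      · rw [hkeys, if_pos ⟨hb, hc⟩]
  · rw [if_neg hb, if_neg (fun hh => hb hh.1)]
    exact ⟨⟨hnd, hk⟩, rfl⟩

-- L12: the whole smlst fold
lemma foldA_good (biglst : List Int) : ∀ (sm : List Int) (d : PySem.Dict Int (List Int)),
    pvGood biglst d →
    pvGood biglst (sm.foldl (fun d num => pvInner biglst num d) d) ∧
    (sm.foldl (fun d num => pvInner biglst num d) d).keys =
      d.keys ++ pvKeyseq biglst sm d.keys := by
  intro sm
  induction sm with
  | nil => intro d hg; exact ⟨hg, by simp [pvKeyseq]⟩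
  | cons num rest ih =>
    intro d hg
    obtain ⟨hg', hkeys⟩ := pvInner_good biglst num d hg
    obtain ⟨hg'', hkeys'⟩ := ih (pvInner biglst num d) hg'
    simp only [List.foldl_cons]
    refine ⟨hg'', ?_⟩
    rw [hkeys', hkeys]
    by_cases hc : num ∈ biglst ∧ num ∉ d.keys
    · rw [if_pos hc]
      simp only [pvKeyseq, if_pos hc, List.append_assoc, List.singleton_append]
    · rw [if_neg hc]
      simp only [pvKeyseq, if_neg hc]
-- L13: values of a good dict
lemma values_map_max (biglst : List Int) (d : PySem.Dict Int (List Int)) (hg : pvGood biglst d) :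
    (PySem.Dict.values d).map (fun val => pvMax val) = d.keys.map (pvLi biglst) := by
  obtain ⟨hnd, hk⟩ := hg
  rw [PySem.Dict.values_eq_map_keys d hnd [], List.map_map]
  apply List.map_congr_left
  intro k hkm
  obtain ⟨_, hmem, hall⟩ := hk k hkm
  exact pvMax_spec _ _ hmem hall

-- L14: B's main loop vs the key sequence
def pvLastD (biglst : List Int) : PySem.Dict Int Int :=
  (PySem.List.enumerate biglst 0).foldl (fun d p => d.insert p.2 p.1) PySem.Dict.empty

lemma pvGo_eq (biglst : List Int) :
    ∀ (sm : List Int) (prev : Option Int) (seen : List Int),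
    pvGo (pvLastD biglst) sm prev seen
      = pvChkFrom prev ((pvKeyseq biglst sm seen).map (pvLi biglst)) := by
  intro sm
  induction sm with
  | nil =>
    intro prev seen
    cases prev <;> rfl
  | cons num rest ih =>
    intro prev seen
    have hget : (pvLastD biglst).get? num
        = if num ∈ biglst then some (pvLi biglst num) else none := lastDict_get? biglst num
    have hcontains : (pvLastD biglst).contains num = decide (num ∈ biglst) := by
      rw [PySem.Dict.contains_eq_isSome_get?, hget]
      by_cases hb : num ∈ biglst <;> simp [hb]
    by_cases hb : num ∈ biglst
    · by_cases hs : num ∈ seen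
      · rw [show pvGo (pvLastD biglst) (num :: rest) prev seen
            = pvGo (pvLastD biglst) rest prev seen by
          simp [pvGo, hcontains, hb, hs]]
        rw [ih, show pvKeyseq biglst (num :: rest) seen = pvKeyseq biglst rest seen by
          simp [pvKeyseq, hb, hs]]
      · have hj : (pvLastD biglst).getD num 0 = pvLi biglst num := by
          rw [PySem.Dict.getD_eq_get?_getD, hget, if_pos hb]
          rfl
        have hadd : PySem.Set.add seen num = seen ++ [num] := by
          simp [PySem.Set.add, PySem.Set.contains, hs]
        have hkq : pvKeyseq biglst (num :: rest) seen =
            num :: pvKeyseq biglst rest (seen ++ [num]) := by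
          simp [pvKeyseq, hb, hs]
        cases prev with
        | none =>
          rw [show pvGo (pvLastD biglst) (num :: rest) none seen
              = pvGo (pvLastD biglst) rest (some (pvLi biglst num)) (PySem.Set.add seen num) by
            simp [pvGo, hcontains, PySem.Set.contains, hb, hs, hj]]
          rw [hadd, ih, hkq]
          rfl
        | some p =>
          rw [show pvGo (pvLastD biglst) (num :: rest) (some p) seen
              = if pvLi biglst num ≤ p then false
                else pvGo (pvLastD biglst) rest (some (pvLi biglst num)) (PySem.Set.add seen num) by
            simp [pvGo, hcontains, PySem.Set.contains, hb, hs, hj, not_lt]]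
          rw [hkq]
          simp only [List.map_cons, pvChkFrom, pvChk]
          by_cases hle : pvLi biglst num ≤ p
          · rw [if_pos hle, if_pos hle]
          · rw [if_neg hle, if_neg hle, hadd, ih]
            rfl
    · rw [show pvGo (pvLastD biglst) (num :: rest) prev seen
          = pvGo (pvLastD biglst) rest prev seen by
        simp [pvGo, hcontains, hb]]
      rw [ih, show pvKeyseq biglst (num :: rest) seen = pvKeyseq biglst rest seen by
        simp [pvKeyseq, hb]]
-- L15: pvChk of a singleton / nil
lemma pvChk_short (l : List Int) (h : l.length ≤ 1) : pvChk l = true := by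
  match l, h with
  | [], _ => rfl
  | [x], _ => rfl

-- L16: A's index loop is the adjacent check
lemma chkLoop_eq (lst : List Int) : ∀ (n k : Nat), lst.length - k ≤ n →
    pvChkLoop lst (PySem.List.pyRange (k : Int) ((lst.length : Int) - 1) 1) = pvChk (lst.drop k) := by
  intro n
  induction n with
  | zero =>
    intro k hk
    have hk' : lst.length ≤ k := by omega
    rw [PySem.List.pyRange_one_eq_nil (by omega)]
    rw [List.drop_eq_nil_of_le hk']
    rfl
  | succ n ih =>
    intro k hk
    by_cases hlt : k + 1 < lst.length
    · rw [PySem.List.pyRange_one_cons (by omega)]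
      have h1 : PySem.List.pyGetD lst ((k : Int) + 1) 0 = lst[k + 1] := by
        rw [show (k : Int) + 1 = ((k + 1 : Nat) : Int) by push_cast; ring,
          PySem.List.pyGetD_natCast, List.getD_eq_getElem?_getD, List.getElem?_eq_getElem hlt]
        rfl
      have h0 : PySem.List.pyGetD lst (k : Int) 0 = lst[k] := by
        rw [PySem.List.pyGetD_natCast, List.getD_eq_getElem?_getD,
          List.getElem?_eq_getElem (by omega)]
        rfl
      have hdropk : lst.drop k = lst[k] :: lst.drop (k + 1) :=
        List.drop_eq_getElem_cons (by omega)
      have hdropk1 : lst.drop (k + 1) = lst[k + 1] :: lst.drop (k + 2) :=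
        List.drop_eq_getElem_cons hlt
      rw [show ((k : Int) + 1) = (((k + 1 : Nat)) : Int) by push_cast; ring]
      rw [hdropk, hdropk1]
      simp only [pvChkLoop, pvChk, h1, h0, not_lt]
      by_cases hle : lst[k + 1] ≤ lst[k]
      · rw [if_pos hle, if_pos hle]
      · rw [if_neg hle, if_neg hle, ih (k + 1) (by omega), hdropk1]
    · rw [PySem.List.pyRange_one_eq_nil (by omega)]
      rw [pvChk_short _ (by rw [List.length_drop]; omega)]
      rfl

-- ===== VERDICT (by name: the statement is the Claim_ definition above) =====
theorem is_ord_sub_spec : Claim_equal_is_ord_sub := by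
  intro smlst biglst _
  unfold Spec_is_ord_sub
  have hgood0 : pvGood biglst PySem.Dict.empty := by
    constructor
    · rw [PySem.Dict.keys_empty]; exact List.nodup_nil
    · intro k hk; rw [PySem.Dict.keys_empty] at hk; exact absurd hk (List.not_mem_nil)
  obtain ⟨hgood, hkeys⟩ := foldA_good biglst smlst PySem.Dict.empty hgood0
  have hlst : (PySem.Dict.values (smlst.foldl (fun d num => pvInner biglst num d)
      PySem.Dict.empty)).map (fun val => pvMax val)
      = (pvKeyseq biglst smlst []).map (pvLi biglst) := by
    rw [values_map_max biglst _ hgood, hkeys, PySem.Dict.keys_empty, List.nil_append]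
  have hA : is_ord_sub smlst biglst
      = pvChk ((pvKeyseq biglst smlst []).map (pvLi biglst)) := by
    show pvChkLoop _ _ = _
    rw [hlst]
    have := chkLoop_eq ((pvKeyseq biglst smlst []).map (pvLi biglst))
      ((pvKeyseq biglst smlst []).map (pvLi biglst)).length 0 (by omega)
    simpa [PySem.List.len] using this
  have hB : is_ord_sub_alt smlst biglst
      = pvChk ((pvKeyseq biglst smlst []).map (pvLi biglst)) := by
    show pvGo (pvLastD biglst) smlst none PySem.Set.empty = _
    rw [show (PySem.Set.empty : PySem.Set Int) = ([] : List Int) from rfl, pvGo_eq]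
    rfl
  rw [hA, hB]
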